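-- pv_equiv track=rewrite | github.com/DarKoul-Wmg/AMS-AWS-1 | MP03 Programación/UF2_Python dineño modular/Ejercicios/PT24_recursividad1/ex9vectorsiguals.py | vectors_iguals
-- ===== SOURCE A (Python) =====
-- def vectors_iguals(vec1,vec2):
--     if len(vec1) == 0 and len(vec2) == 0:
--         return True
--     else:
--         if vec1[-1] == vec2[-1]:
--             return vectors_iguals(vec1[:-1],vec2[:-1])
--         else:
--             return False
-- ===== SOURCE B (Python) =====
-- def vectors_iguals(vec1, vec2):
--     # Idiomatic one-pass comparison instead of recursive tail slicing.
--     return vec1 == vec2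
-- ===== Notes on version B (the rewrite author's own statement) =====
-- stated objective: faster
-- what changed: Replaced the tail-slicing recursion (a new copy of both lists per step) with a direct list equality comparison in one pass.
-- crash fix: A raises IndexError whenever the lengths differ but the overlapping tail segments are equal (the recursion empties one list first); B returns False there. — e.g. on vectors_iguals([1], [1, 1]): A raises IndexError, B returns false
import Mathlib
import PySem

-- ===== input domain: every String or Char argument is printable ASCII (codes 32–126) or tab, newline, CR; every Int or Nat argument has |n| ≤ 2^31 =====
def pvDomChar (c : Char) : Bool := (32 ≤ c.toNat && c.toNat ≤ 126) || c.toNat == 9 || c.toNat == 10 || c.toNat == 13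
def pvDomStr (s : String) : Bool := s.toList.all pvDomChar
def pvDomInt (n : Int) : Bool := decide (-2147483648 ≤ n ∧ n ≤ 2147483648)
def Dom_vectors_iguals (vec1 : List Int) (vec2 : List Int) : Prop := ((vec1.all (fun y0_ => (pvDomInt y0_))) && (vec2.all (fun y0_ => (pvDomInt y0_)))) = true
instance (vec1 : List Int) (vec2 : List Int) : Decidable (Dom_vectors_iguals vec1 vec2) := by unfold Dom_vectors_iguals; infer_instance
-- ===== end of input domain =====

-- B replaces A's tail-slicing recursion with a direct list equality comparison (idiomatic, one pass).

-- ===== PORT A =====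
-- Literal port of A's recursion: compare the last elements (vec[-1]), recurse on vec[:-1].
-- The `| _, _ => false` arm is Python's IndexError (one list empty, the other not); Pre_ excludes it.
def vectors_iguals (vec1 : List Int) (vec2 : List Int) : Bool :=
  if vec1.length = 0 ∧ vec2.length = 0 then
    true
  else
    match h1 : PySem.List.pyGet? vec1 (-1), PySem.List.pyGet? vec2 (-1) with
    | some a, some b =>
      if a = b then
        vectors_iguals (PySem.List.slice vec1 none (some (-1))) (PySem.List.slice vec2 none (some (-1)))
      else false
    | _, _ => false
termination_by vec1.length
decreasing_by
  rw [PySem.List.pyGet?_neg_one] at h1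
  have hne : vec1 ≠ [] := by intro hh; subst hh; simp at h1
  have hp : 0 < vec1.length := List.length_pos_iff.mpr hne
  rw [PySem.List.slice_to_neg_one]
  simp [List.length_dropLast]
  omega

-- ===== PORT B =====
def vectors_iguals_alt (vec1 : List Int) (vec2 : List Int) : Bool :=
  decide (vec1 = vec2)

-- ===== PRECONDITION & SPEC =====
-- Pre_ excludes exactly the inputs on which A raises IndexError: lengths differ and the
-- overlapping tail segments (of the shorter length) are equal, so the recursion empties one list.
def Pre_vectors_iguals (vec1 : List Int) (vec2 : List Int) : Prop :=
  vec1.length = vec2.length ∨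
    vec1.drop (vec1.length - min vec1.length vec2.length) ≠
      vec2.drop (vec2.length - min vec1.length vec2.length)
instance (vec1 : List Int) (vec2 : List Int) : Decidable (Pre_vectors_iguals vec1 vec2) := by unfold Pre_vectors_iguals; infer_instance

def pvWitness_vectors_iguals : List Int × List Int := ([1, 2, 3], [1, 2, 3])

-- A raises IndexError when the lengths differ but the overlapping tail segments are equal;
-- B returns false there (proved at the bottom as vectors_iguals_raises).
def Raises_vectors_iguals (vec1 : List Int) (vec2 : List Int) : Prop :=
  vec1.length ≠ vec2.length ∧
    vec1.drop (vec1.length - min vec1.length vec2.length) =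
      vec2.drop (vec2.length - min vec1.length vec2.length)
instance (vec1 : List Int) (vec2 : List Int) : Decidable (Raises_vectors_iguals vec1 vec2) := by unfold Raises_vectors_iguals; infer_instance
def pvRaiseWitness_vectors_iguals : List Int × List Int := ([1], [1, 1])
def pvRaiseWitnessOut_vectors_iguals : Bool := false

def Spec_vectors_iguals (vec1 : List Int) (vec2 : List Int) (out : Bool) : Prop := out = vectors_iguals_alt vec1 vec2
instance (vec1 : List Int) (vec2 : List Int) (out : Bool) : Decidable (Spec_vectors_iguals vec1 vec2 out) := by unfold Spec_vectors_iguals; infer_instance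

-- ===== CLAIM (what is proved, stated in full; the proofs are below) =====
def Claim_equal_vectors_iguals : Prop := ∀ (vec1 : List Int) (vec2 : List Int), Dom_vectors_iguals vec1 vec2 → Pre_vectors_iguals vec1 vec2 → Spec_vectors_iguals vec1 vec2 (vectors_iguals vec1 vec2)
def Claim_raises_vectors_iguals : Prop := (∀ (vec1 : List Int) (vec2 : List Int), Dom_vectors_iguals vec1 vec2 → Raises_vectors_iguals vec1 vec2 → ¬ Pre_vectors_iguals vec1 vec2) ∧ (Dom_vectors_iguals (pvRaiseWitness_vectors_iguals.1) (pvRaiseWitness_vectors_iguals.2) ∧ Raises_vectors_iguals (pvRaiseWitness_vectors_iguals.1) (pvRaiseWitness_vectors_iguals.2) ∧ vectors_iguals_alt (pvRaiseWitness_vectors_iguals.1) (pvRaiseWitness_vectors_iguals.2) = pvRaiseWitnessOut_vectors_iguals)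

-- ===== LEMMAS AND PROOFS =====

-- A's port computes list equality on EVERY input (in the IndexError arm it returns false,
-- and there the lists indeed differ); the Pre_ hypothesis is then not needed for equality.
theorem vectors_iguals_eq_decide (v1 v2 : List Int) :
    vectors_iguals v1 v2 = decide (v1 = v2) := by
  fun_induction vectors_iguals v1 v2 with
  | case1 v1 v2 h =>
    obtain ⟨h1, h2⟩ := h
    simp [List.length_eq_zero_iff.mp h1, List.length_eq_zero_iff.mp h2]
  | case2 v1 v2 h a hv2 hv1 ih =>
    rw [PySem.List.pyGet?_neg_one] at hv1 hv2
    have hne1 : v1 ≠ [] := by intro hh; subst hh; simp at hv1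
    have hne2 : v2 ≠ [] := by intro hh; subst hh; simp at hv2
    have ha : v1.getLast hne1 = a := by
      have h' := List.getLast?_eq_some_getLast hne1; rw [hv1] at h'
      exact (Option.some.inj h').symm
    have hb : v2.getLast hne2 = a := by
      have h' := List.getLast?_eq_some_getLast hne2; rw [hv2] at h'
      exact (Option.some.inj h').symm
    have e1 : v1.dropLast ++ [a] = v1 := by
      have h' := List.dropLast_append_getLast hne1; rwa [ha] at h'
    have e2 : v2.dropLast ++ [a] = v2 := by
      have h' := List.dropLast_append_getLast hne2; rwa [hb] at h'
    rw [ih, PySem.List.slice_to_neg_one, PySem.List.slice_to_neg_one]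
    simp only [decide_eq_decide]
    constructor
    · intro hd; rw [← e1, ← e2, hd]
    · intro hd; rw [hd]
  | case3 v1 v2 h a b hv1 hv2 hne =>
    have hne' : v1 ≠ v2 := by
      intro e; rw [e, hv2] at hv1
      exact hne (Option.some.inj hv1).symm
    simp [hne']
  | case4 v1 v2 h hx =>
    have hne' : v1 ≠ v2 := by
      intro e; subst e
      by_cases hv : v1 = []
      · exact h ⟨by simp [hv], by simp [hv]⟩
      · obtain ⟨c, hc⟩ := Option.isSome_iff_exists.mp (List.getLast?_isSome.mpr hv)
        exact hx c c (by rw [PySem.List.pyGet?_neg_one]; exact hc)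
          (by rw [PySem.List.pyGet?_neg_one]; exact hc)
    simp [hne']

-- ===== VERDICT (by name: the statement is the Claim_ definition above) =====
theorem vectors_iguals_spec : Claim_equal_vectors_iguals := by
  intro v1 v2 _ _
  unfold Spec_vectors_iguals vectors_iguals_alt
  exact vectors_iguals_eq_decide v1 v2

theorem vectors_iguals_raises : Claim_raises_vectors_iguals := by
  unfold Claim_raises_vectors_iguals
  constructor
  · intro v1 v2 _ hr hp
    rcases hp with hp | hp
    · exact hr.1 hp
    · exact hp hr.2
  · decide

-- Self-check: the raise witness itself lies outside Pre_ (a corollary of vectors_iguals_raises).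
theorem vectors_iguals_raiseWitness_outside_pre_ok : ¬ Pre_vectors_iguals [1] [1, 1] :=
  vectors_iguals_raises.1 [1] [1, 1] (by decide) vectors_iguals_raises.2.2.1
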